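-- pv_equiv track=rewrite | github.com/youngw417/Graphs | projects/ancestor/ancestor.py | get_earlist_ancestor
-- ===== SOURCE A (Python) =====
-- def get_earlist_ancestor(path):  # path = [[1, 2, 5], [2, 4, 6], [3, 6]]
--     max_ancestor_list = []
--     highest = max([ len(x) for x in path]) # find the max length of list
--     for i in range(len(path)):
--         if len(path[i]) == highest:
--             # in case of multiple lists with the same highest length, put those into max_ancestor
--             max_ancestor_list.append(path[i])
--     ancestor = min([x[-1] for x in max_ancestor_list]) # compare the last element and get the lowest
--     return ancestor
-- ===== SOURCE B (Python) =====
-- def get_earlist_ancestor(path):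
--     # Single pass: track the longest length seen and the smallest last element
--     # among sublists of that length.
--     best_len = 0
--     best = None
--     for x in path:
--         if len(x) > best_len:
--             best_len = len(x)
--             best = x[-1]
--         elif x and len(x) == best_len:
--             best = min(best, x[-1])
--     if best is None:
--         raise ValueError("no nonempty sublist")
--     return best
-- ===== Notes on version B (the rewrite author's own statement) =====
-- stated objective: simpler
-- what changed: Replaces A's three passes (max of lengths, index loop collecting the longest sublists, min over their last elements) by one fold that tracks the best length and the min last element as it goes.
-- outside the precondition, e.g. on get_earlist_ancestor([]): A raises ValueError, B raises ValueError; on get_earlist_ancestor([[], []]): A raises IndexError, B raises ValueError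
import Mathlib
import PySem

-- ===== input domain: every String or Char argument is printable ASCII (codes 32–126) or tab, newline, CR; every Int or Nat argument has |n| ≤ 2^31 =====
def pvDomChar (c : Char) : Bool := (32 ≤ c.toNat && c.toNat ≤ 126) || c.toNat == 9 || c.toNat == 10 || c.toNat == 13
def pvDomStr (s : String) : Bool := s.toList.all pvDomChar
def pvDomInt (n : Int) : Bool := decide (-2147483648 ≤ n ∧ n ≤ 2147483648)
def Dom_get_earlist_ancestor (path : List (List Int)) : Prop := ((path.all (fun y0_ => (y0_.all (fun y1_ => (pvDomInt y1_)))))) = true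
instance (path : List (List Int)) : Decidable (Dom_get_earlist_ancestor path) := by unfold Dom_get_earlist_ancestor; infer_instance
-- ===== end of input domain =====

-- B replaces A's three passes by a single fold tracking (best length, min last element);
-- same return value on Pre_ (A and B both raise when path has no nonempty sublist).

-- ===== PORT A =====
def get_earlist_ancestor (path : List (List Int)) : Int :=
  let highest := (PySem.List.max? (path.map (fun x => (x.length : Int))) (fun y => y)).getD 0
    -- max([]) raises ValueError: outside Pre_, default never used there
  let max_ancestor_list :=
    (PySem.List.pyRange 0 (path.length : Int) 1).foldl
      (fun acc i =>
        if ((PySem.List.pyGetD path i []).length : Int) = highest then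
          acc ++ [PySem.List.pyGetD path i []]
        else acc) []
  (PySem.List.min? (max_ancestor_list.map (fun x => PySem.List.pyGetD x (-1) 0)) (fun y => y)).getD 0
    -- x[-1] on an empty longest sublist raises IndexError: outside Pre_

-- ===== PORT B =====
def stepB (s : Int × Option Int) (x : List Int) : Int × Option Int :=
  if (x.length : Int) > s.1 then ((x.length : Int), some (PySem.List.pyGetD x (-1) 0))
  else if x ≠ [] ∧ (x.length : Int) = s.1 then
    (s.1, some (min (s.2.getD 0) (PySem.List.pyGetD x (-1) 0)))
    -- in Source B `best` is a plain int here (never None when this branch fires), hence getD 0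
  else s

def get_earlist_ancestor_alt (path : List (List Int)) : Int :=
  let s := path.foldl stepB ((0 : Int), (none : Option Int))
  s.2.getD 0  -- `best is None` raises ValueError: outside Pre_

-- ===== PRECONDITION & SPEC =====
-- Pre_ excludes exactly the inputs where A raises: empty path (ValueError on max([]))
-- and paths whose sublists are all empty (IndexError on x[-1]); B raises there too.
def Pre_get_earlist_ancestor (path : List (List Int)) : Prop := ∃ x ∈ path, x ≠ []
instance (path : List (List Int)) : Decidable (Pre_get_earlist_ancestor path) := by
  unfold Pre_get_earlist_ancestor; infer_instance

def pvWitness_get_earlist_ancestor : List (List Int) := [[1, 2, 5], [2, 4, 6], [3, 6]]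

def Spec_get_earlist_ancestor (path : List (List Int)) (out : Int) : Prop := out = get_earlist_ancestor_alt path
instance (path : List (List Int)) (out : Int) : Decidable (Spec_get_earlist_ancestor path out) := by unfold Spec_get_earlist_ancestor; infer_instance

-- ===== CLAIM (what is proved, stated in full; the proofs are below) =====
def Claim_equal_get_earlist_ancestor : Prop := ∀ (path : List (List Int)), Dom_get_earlist_ancestor path → Pre_get_earlist_ancestor path → Spec_get_earlist_ancestor path (get_earlist_ancestor path)

-- ===== LEMMAS AND PROOFS =====

-- min of a nonempty list, as A's min?(lst) computes it on Ints
def minList : List Int → Option Int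
  | [] => none
  | a :: t => some (t.foldl min a)

def lastD (x : List Int) : Int := PySem.List.pyGetD x (-1) 0

-- running maximum of the sublist lengths, seeded with bl
def maxLenFrom (bl : Int) (rest : List (List Int)) : Int :=
  rest.foldl (fun a x => max a (x.length : Int)) bl

theorem maxLenFrom_eq_foldl_map (bl : Int) (rest : List (List Int)) :
    maxLenFrom bl rest = (rest.map (fun x => (x.length : Int))).foldl max bl := by
  rw [maxLenFrom, List.foldl_map]

theorem le_maxLenFrom (bl : Int) (rest : List (List Int)) : bl ≤ maxLenFrom bl rest := by
  rw [maxLenFrom_eq_foldl_map]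
  exact (PySem.List.le_foldl_max _ _).1

theorem stepB_core (rest : List (List Int)) (bl m : Int) (hbl : 1 ≤ bl) :
    rest.foldl stepB (bl, some m)
      = (maxLenFrom bl rest,
         minList ((if bl = maxLenFrom bl rest then [m] else []) ++
           (rest.filter (fun x => (x.length : Int) = maxLenFrom bl rest)).map lastD)) := by
  induction rest generalizing bl m with
  | nil => simp [maxLenFrom, minList]
  | cons y t ih =>
    rcases lt_trichotomy bl ((y.length : Int)) with h1 | h1 | h1
    · -- a new maximum: the state becomes (len y, last y)
      have hs : stepB (bl, some m) y = (((y.length : Int)), some (lastD y)) := by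
        simp [stepB, h1, lastD]
      have hH : maxLenFrom bl (y :: t) = maxLenFrom ((y.length : Int)) t := by
        simp [maxLenFrom, max_eq_right h1.le]
      have hle : (y.length : Int) ≤ maxLenFrom ((y.length : Int)) t := le_maxLenFrom _ _
      rw [List.foldl_cons, hs, ih _ _ (by omega), hH]
      have hbne : ¬ (bl = maxLenFrom ((y.length : Int)) t) := by omega
      rw [List.filter_cons, if_neg hbne]
      by_cases h2 : (y.length : Int) = maxLenFrom ((y.length : Int)) t
      · rw [if_pos h2, if_pos (by simpa using h2), List.map_cons]
        simp [minList]
      · rw [if_neg h2, if_neg (by simpa using h2)]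
    · -- same length: fold the last element into the minimum
      subst h1
      have hy : y ≠ [] := by
        intro hc; rw [hc] at hbl; simp at hbl
      have hs : stepB (((y.length : Int)), some m) y = (((y.length : Int)), some (min m (lastD y))) := by
        simp [stepB, hy, lastD]
      have hH : maxLenFrom ((y.length : Int)) (y :: t) = maxLenFrom ((y.length : Int)) t := by
        simp [maxLenFrom]
      rw [List.foldl_cons, hs, ih _ _ hbl, hH, List.filter_cons]
      by_cases h2 : ((y.length : Int)) = maxLenFrom ((y.length : Int)) t
      · rw [if_pos h2, if_pos h2, if_pos (by simpa using h2), List.map_cons]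
        simp only [List.singleton_append, minList, List.foldl_cons]
      · rw [if_neg h2, if_neg h2, if_neg (by simpa using h2)]
    · -- shorter: the state is unchanged
      have hs : stepB (bl, some m) y = (bl, some m) := by
        have h1' : ¬ ((y.length : Int) > bl) := by omega
        have h2' : ¬ (y ≠ [] ∧ (y.length : Int) = bl) := by rintro ⟨-, hc⟩; omega
        simp [stepB, h1', h2']
      have hH : maxLenFrom bl (y :: t) = maxLenFrom bl t := by
        simp [maxLenFrom, max_eq_left h1.le]
      have hle : bl ≤ maxLenFrom bl t := le_maxLenFrom _ _
      have hne : ¬ ((y.length : Int) = maxLenFrom bl t) := by omega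
      have hnb : ¬ (decide ((y.length : Int) = maxLenFrom bl t) = true) := by simpa using hne
      rw [List.foldl_cons, hs, ih _ _ hbl, hH, List.filter_cons, if_neg hnb]

-- A rewritten as a filter/min closed form (the pyRange loop eliminated)
theorem A_closed (path : List (List Int)) :
    get_earlist_ancestor path =
      (PySem.List.min?
        ((path.filter (fun x => (x.length : Int) =
            (PySem.List.max? (path.map (fun x => (x.length : Int))) (fun y => y)).getD 0)).map lastD)
        (fun y => y)).getD 0 := by
  have key : ∀ (H : Int),
      (PySem.List.pyRange 0 (path.length : Int) 1).foldl
        (fun acc i => if ((PySem.List.pyGetD path i []).length : Int) = H then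
            acc ++ [PySem.List.pyGetD path i []] else acc) []
        = path.filter (fun x => (x.length : Int) = H) := by
    intro H
    rw [PySem.List.foldl_pyRange_zero_pyGetD' path []
        (fun acc x => if ((x.length : Int)) = H then acc ++ [x] else acc) []]
    rw [PySem.List.foldl_append_ite_eq_filter]
    simp
  simp only [get_earlist_ancestor]
  rw [key]
  rfl

theorem main_equiv (path : List (List Int)) (h : ∃ x ∈ path, x ≠ []) :
    get_earlist_ancestor path = get_earlist_ancestor_alt path := by
  induction path with
  | nil => simp at h
  | cons x rest ih =>
    by_cases hx : x = []
    · subst hx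
      rcases h with ⟨z, hz, hzne⟩
      have hz' : z ∈ rest := by
        rcases List.mem_cons.mp hz with h' | h'
        · exact absurd h' hzne
        · exact h'
      -- B skips the empty sublist
      have hB : get_earlist_ancestor_alt ([] :: rest) = get_earlist_ancestor_alt rest := by
        unfold get_earlist_ancestor_alt
        rw [List.foldl_cons]
        congr 1
      -- A: the empty sublist changes neither the max nor the filtered list
      rcases List.exists_cons_of_ne_nil (List.ne_nil_of_mem hz') with ⟨a, t, hat⟩
      subst hat
      have hzlen : 1 ≤ (z.length : Int) := by
        have : z.length ≠ 0 := by simpa [List.length_eq_zero_iff] using hzne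
        omega
      have hfold : (PySem.List.max? ((a :: t).map (fun x => (x.length : Int))) (fun y => y)).getD 0
          = maxLenFrom ((a.length : Int)) t := by
        rw [List.map_cons, PySem.List.max?_id_cons, Option.getD_some, maxLenFrom_eq_foldl_map]
      have h1H : 1 ≤ maxLenFrom ((a.length : Int)) t := by
        rcases List.mem_cons.mp hz' with h' | h'
        · have := le_maxLenFrom ((a.length : Int)) t
          rw [h'] at hzlen
          omega
        · have := (PySem.List.le_foldl_max (t.map (fun x => (x.length : Int))) ((a.length : Int))).2
            ((z.length : Int)) (List.mem_map_of_mem (f := fun x => (x.length : Int)) h')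
          rw [maxLenFrom_eq_foldl_map]
          omega
      have hA : get_earlist_ancestor ([] :: a :: t) = get_earlist_ancestor (a :: t) := by
        rw [A_closed, A_closed]
        have hcons : (PySem.List.max? ((([] : List Int) :: a :: t).map (fun x => (x.length : Int))) (fun y => y)).getD 0
            = (PySem.List.max? ((a :: t).map (fun x => (x.length : Int))) (fun y => y)).getD 0 := by
          simp only [List.map_cons, PySem.List.max?_id_cons, Option.getD_some,
            List.length_nil, Nat.cast_zero, List.foldl_cons]
          rw [max_eq_right (Int.natCast_nonneg _)]
        rw [hcons, hfold]
        have hne : ¬ ((0 : Int) = maxLenFrom ((a.length : Int)) t) := by omega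
        rw [List.filter_cons, if_neg (by simpa using hne)]
      rw [hA, hB]
      exact ih ⟨z, hz', hzne⟩
    · -- first sublist nonempty: B seeds the fold with it, stepB_core finishes
      have hlen : 1 ≤ (x.length : Int) := by
        have : x.length ≠ 0 := by simpa [List.length_eq_zero_iff] using hx
        omega
      have hB : get_earlist_ancestor_alt (x :: rest)
          = (minList ((if (x.length : Int) = maxLenFrom ((x.length : Int)) rest then [lastD x] else []) ++
              (rest.filter (fun y => (y.length : Int) = maxLenFrom ((x.length : Int)) rest)).map lastD)).getD 0 := by
        unfold get_earlist_ancestor_alt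
        rw [List.foldl_cons]
        have hs : stepB (0, none) x = (((x.length : Int)), some (lastD x)) := by
          simp [stepB, lastD, hx]
        rw [hs, stepB_core rest _ _ hlen]
      have hHeq : (PySem.List.max? ((x :: rest).map (fun y => (y.length : Int))) (fun y => y)).getD 0
          = maxLenFrom ((x.length : Int)) rest := by
        rw [List.map_cons, PySem.List.max?_id_cons, Option.getD_some, maxLenFrom_eq_foldl_map]
      rw [A_closed, hB, hHeq, List.filter_cons]
      by_cases h2 : (x.length : Int) = maxLenFrom ((x.length : Int)) rest
      · rw [if_pos (by simpa using h2), if_pos h2, List.map_cons, PySem.List.min?_id_cons]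
        simp [minList]
      · rw [if_neg (by simpa using h2), if_neg h2]
        -- the max is attained in rest, so the filtered list is nonempty
        have hle : (x.length : Int) ≤ maxLenFrom ((x.length : Int)) rest := le_maxLenFrom _ _
        have hmem : ∃ z ∈ rest, (z.length : Int) = maxLenFrom ((x.length : Int)) rest := by
          rcases PySem.List.foldl_max_mem (rest.map (fun y => ((y.length : Int)))) ((x.length : Int)) with hc | hc
          · exfalso
            rw [← maxLenFrom_eq_foldl_map] at hc
            exact h2 hc.symm
          · rw [← maxLenFrom_eq_foldl_map] at hc
            rcases List.mem_map.mp hc with ⟨z, hzmem, hzeq⟩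
            exact ⟨z, hzmem, hzeq⟩
        rcases hmem with ⟨z, hzmem, hzeq⟩
        have hfil : z ∈ rest.filter (fun y => (y.length : Int) = maxLenFrom ((x.length : Int)) rest) :=
          List.mem_filter.mpr ⟨hzmem, by simpa using hzeq⟩
        rcases List.exists_cons_of_ne_nil
          (List.ne_nil_of_mem (List.mem_map_of_mem hfil (f := lastD))) with ⟨a, tl, hat⟩
        rw [hat, PySem.List.min?_id_cons]
        simp [minList]

-- ===== VERDICT (by name: the statement is the Claim_ definition above) =====
theorem get_earlist_ancestor_spec : Claim_equal_get_earlist_ancestor := by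
  intro path _ hpre
  exact main_equiv path hpre
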